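-- pv_equiv track=rewrite | github.com/PLCoster/adventofcode2019 | day4.py | valid_passwords_1
-- ===== SOURCE A (Python) =====
-- def valid_passwords_1(passwords):
--     """
--     Takes a list of password strings, and returns the number of passwords in
--     the list meeting the following criteria:
--
--         - Passwords are six digit numbers
--         - In each password two adjacent digits must be the same
--         - In each password, going from largest to smallest digit, the size of
--         the digit does not decrease:
--             111123, 135679, 111111 meet the criteria
--             223450 does not (decreasing pair of digits 50)
--             123789 does not (no double adjacent digits)
--     """
--
--     valid = 0
--
--     for entry in passwords:
--         adjacent = False
--         order = True
--
--         #Check for adjacent duplicate numbers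
--         for i in range(len(entry) - 1):
--
--             if entry[i] == entry[i+1]:
--                 adjacent = True
--
--
--         for i in range(len(entry) - 1):
--
--             if entry[i] > entry[i+1]:
--                 order = False
--
--         if adjacent and order:
--             valid += 1
--
--     return valid
-- ===== SOURCE B (Python) =====
-- def valid_passwords_1(passwords):
--     """Count passwords that are non-decreasing and contain an adjacent
--     duplicate.  Order is checked by comparing against the sorted string;
--     a duplicate (necessarily adjacent once non-decreasing) by comparing
--     set size with length."""
--     return sum(1 for entry in passwords
--                if sorted(entry) == list(entry) and len(set(entry)) < len(entry))
-- ===== Notes on version B (the rewrite author's own statement) =====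
-- stated objective: idiomatic
-- what changed: Replaces the two explicit adjacent-pair index scans and the running counter with a single generator-sum: order is tested as entry == its sorted self and the adjacent-duplicate as len(set(entry)) < len(entry), which is equivalent because under non-decreasing order any duplicate is adjacent.
import Mathlib
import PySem

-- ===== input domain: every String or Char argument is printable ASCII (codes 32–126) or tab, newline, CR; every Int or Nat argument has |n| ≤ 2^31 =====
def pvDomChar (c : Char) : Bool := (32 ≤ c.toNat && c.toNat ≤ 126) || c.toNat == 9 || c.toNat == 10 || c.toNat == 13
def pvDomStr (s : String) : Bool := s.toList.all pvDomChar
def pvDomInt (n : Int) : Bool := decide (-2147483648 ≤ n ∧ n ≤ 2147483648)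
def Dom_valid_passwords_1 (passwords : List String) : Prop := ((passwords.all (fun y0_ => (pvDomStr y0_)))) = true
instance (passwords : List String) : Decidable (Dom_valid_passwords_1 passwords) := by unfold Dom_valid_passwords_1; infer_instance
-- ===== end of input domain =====

-- B replaces A's two adjacent-pair index scans per entry with an idiomatic
-- sorted-equality order test plus a set-size duplicate test (equal count proved).


-- ===== PORT A =====
-- Indices drawn from range(len(entry)-1) are always in range, so Python's
-- entry[i] never raises here; pyGetD with a dummy default is exact on these indices.
def valid_passwords_1 (passwords : List String) : Int :=
  passwords.foldl
    (fun valid entry =>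
      let l := entry.toList
      let adjacent := (PySem.List.pyRange 0 ((l.length : Int) - 1) 1).foldl
        (fun adjacent i =>
          if PySem.List.pyGetD l i ' ' == PySem.List.pyGetD l (i + 1) ' ' then true
          else adjacent) false
      let order := (PySem.List.pyRange 0 ((l.length : Int) - 1) 1).foldl
        (fun order i =>
          if decide (PySem.List.pyGetD l i ' ' > PySem.List.pyGetD l (i + 1) ' ') then false
          else order) true
      if adjacent && order then valid + 1 else valid)
    0

-- ===== PORT B =====
def valid_passwords_1_alt (passwords : List String) : Int :=
  ((passwords.countP (fun entry =>
      (PySem.List.sorted entry.toList (fun c => c) == entry.toList) &&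
      decide ((PySem.Set.ofList entry.toList).length < entry.toList.length)) : Nat) : Int)

-- ===== PRECONDITION & SPEC =====
def Spec_valid_passwords_1 (passwords : List String) (out : Int) : Prop := out = valid_passwords_1_alt passwords
instance (passwords : List String) (out : Int) : Decidable (Spec_valid_passwords_1 passwords out) := by unfold Spec_valid_passwords_1; infer_instance

-- ===== CLAIM (what is proved, stated in full; the proofs are below) =====
def Claim_equal_valid_passwords_1 : Prop := ∀ (passwords : List String), Dom_valid_passwords_1 passwords → Spec_valid_passwords_1 passwords (valid_passwords_1 passwords)

-- ===== LEMMAS AND PROOFS =====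

-- A's adjacent-scan, as a proposition about indices.
lemma anyEq_iff (l : List Char) :
    ((PySem.List.pyRange 0 ((l.length : Int) - 1) 1).any
      (fun i => PySem.List.pyGetD l i ' ' == PySem.List.pyGetD l (i + 1) ' ')) = true ↔
    ∃ (k : Nat) (h : k + 1 < l.length), l[k] = l[k + 1] := by
  rw [List.any_eq_true]
  constructor
  · rintro ⟨i, hmem, hp⟩
    rw [PySem.List.mem_pyRange_one] at hmem
    obtain ⟨h0, hlt⟩ := hmem
    have hk : i.toNat + 1 < l.length := by omega
    refine ⟨i.toNat, hk, ?_⟩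
    rw [PySem.List.pyGetD_of_nonneg _ _ h0, PySem.List.pyGetD_of_nonneg _ _ (by omega : (0:Int) ≤ i + 1)] at hp
    have h1 : (i + 1).toNat = i.toNat + 1 := by omega
    rw [h1] at hp
    rw [List.getD_eq_getElem _ _ (by omega), List.getD_eq_getElem _ _ hk] at hp
    exact beq_iff_eq.mp hp
  · rintro ⟨k, hk, heq⟩
    refine ⟨(k : Int), ?_, ?_⟩
    · rw [PySem.List.mem_pyRange_one]; omega
    · rw [PySem.List.pyGetD_of_nonneg _ _ (by omega), PySem.List.pyGetD_of_nonneg _ _ (by omega)]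
      have h1 : ((k : Int) + 1).toNat = k + 1 := by omega
      have h2 : ((k : Int)).toNat = k := by omega
      rw [h1, h2, List.getD_eq_getElem _ _ (by omega), List.getD_eq_getElem _ _ hk]
      exact beq_iff_eq.mpr heq

-- A's order-scan finds no decrease exactly when the list is non-decreasing.
lemma anyGt_iff (l : List Char) :
    ((PySem.List.pyRange 0 ((l.length : Int) - 1) 1).any
      (fun i => decide (PySem.List.pyGetD l i ' ' > PySem.List.pyGetD l (i + 1) ' '))) = false ↔
    List.Pairwise (· ≤ ·) l := by
  rw [← List.isChain_iff_pairwise, List.isChain_iff_getElem]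
  rw [← Bool.not_eq_true, List.any_eq_true]
  constructor
  · intro h i hi
    by_contra hgt
    apply h
    refine ⟨(i : Int), ?_, ?_⟩
    · rw [PySem.List.mem_pyRange_one]; omega
    · rw [PySem.List.pyGetD_of_nonneg _ _ (by omega), PySem.List.pyGetD_of_nonneg _ _ (by omega)]
      have h1 : ((i : Int) + 1).toNat = i + 1 := by omega
      have h2 : ((i : Int)).toNat = i := by omega
      rw [h1, h2, List.getD_eq_getElem _ _ (by omega), List.getD_eq_getElem _ _ (by omega)]
      simpa using lt_of_not_ge hgt
  · rintro h ⟨i, hmem, hp⟩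
    rw [PySem.List.mem_pyRange_one] at hmem
    obtain ⟨h0, hlt⟩ := hmem
    rw [PySem.List.pyGetD_of_nonneg _ _ h0, PySem.List.pyGetD_of_nonneg _ _ (by omega)] at hp
    have h1 : (i + 1).toNat = i.toNat + 1 := by omega
    rw [h1, List.getD_eq_getElem _ _ (by omega), List.getD_eq_getElem _ _ (by omega)] at hp
    have := h i.toNat (by omega)
    simp only [decide_eq_true_eq] at hp
    exact absurd this (not_le_of_gt hp)

-- set(xs) (first occurrences) is a sublist of xs.
lemma ofList_sublist (l : List Char) : (PySem.Set.ofList l).Sublist l := by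
  induction l using List.reverseRecOn with
  | nil => simp [PySem.Set.ofList]
  | append_singleton xs x ih =>
    rw [PySem.Set.ofList_append_singleton, PySem.Set.add_eq_ite]
    split
    · exact ih.trans (List.sublist_append_left xs [x])
    · exact ih.append (List.Sublist.refl [x])

-- len(set(xs)) < len(xs) says exactly: xs has a duplicate.
lemma len_ofList_lt_iff (l : List Char) :
    (PySem.Set.ofList l).length < l.length ↔ ¬ l.Nodup := by
  constructor
  · intro h hnd
    rw [PySem.Set.ofList_eq_self_of_nodup l hnd] at h
    omega
  · intro hnd
    rcases Nat.lt_or_ge (PySem.Set.ofList l).length l.length with h | h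
    · exact h
    · exfalso
      have hle := PySem.Set.length_ofList_le l
      have heq := (ofList_sublist l).eq_of_length (by omega)
      exact hnd (heq ▸ PySem.Set.nodup_ofList l)

-- In a non-decreasing list, a duplicate exists iff an ADJACENT duplicate exists.
lemma adj_dup_iff (l : List Char) (hord : List.Pairwise (· ≤ ·) l) :
    (∃ (k : Nat) (h : k + 1 < l.length), l[k] = l[k + 1]) ↔ ¬ l.Nodup := by
  constructor
  · rintro ⟨k, hk, heq⟩ hnd
    have := (List.pairwise_iff_getElem.mp hnd) k (k + 1) (by omega) hk (by omega)
    exact this heq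
  · intro hnd
    rw [List.Nodup, List.pairwise_iff_getElem] at hnd
    push Not at hnd
    obtain ⟨i, j, hi, hj, hij, heq⟩ := hnd
    refine ⟨i, by omega, ?_⟩
    have h1 : l[i] ≤ l[i + 1] :=
      List.pairwise_iff_getElem.mp hord i (i + 1) hi (by omega) (by omega)
    have h2 : l[i + 1] ≤ l[j] := by
      rcases Nat.eq_or_lt_of_le (by omega : i + 1 ≤ j) with h | h
      · subst h; exact le_refl _
      · exact List.pairwise_iff_getElem.mp hord (i + 1) j (by omega) hj h
    exact le_antisymm h1 (heq ▸ h2)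

-- sorted(entry) == list(entry) says exactly: entry is non-decreasing.
lemma sorted_eq_iff (l : List Char) :
    (PySem.List.sorted l (fun c => c) == l) = true ↔ List.Pairwise (· ≤ ·) l := by
  rw [beq_iff_eq]
  constructor
  · intro h
    have := PySem.List.sorted_pairwise l (fun c => c)
    rw [h] at this
    exact this
  · intro h
    exact PySem.List.sorted_eq_self_of_pairwise l (fun c => c) h

-- The per-entry tests of A and B agree.
lemma entry_eq (entry : String) :
    ((((PySem.List.pyRange 0 ((entry.toList.length : Int) - 1) 1).any
        (fun i => PySem.List.pyGetD entry.toList i ' ' == PySem.List.pyGetD entry.toList (i + 1) ' ')) &&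
      !((PySem.List.pyRange 0 ((entry.toList.length : Int) - 1) 1).any
        (fun i => decide (PySem.List.pyGetD entry.toList i ' ' > PySem.List.pyGetD entry.toList (i + 1) ' ')))) = true) ↔
    (((PySem.List.sorted entry.toList (fun c => c) == entry.toList) &&
      decide ((PySem.Set.ofList entry.toList).length < entry.toList.length)) = true) := by
  set l := entry.toList with hl
  rw [Bool.and_eq_true, Bool.and_eq_true, Bool.not_eq_true', anyEq_iff, anyGt_iff,
    sorted_eq_iff, decide_eq_true_eq, len_ofList_lt_iff]
  constructor
  · rintro ⟨hdup, hord⟩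
    exact ⟨hord, (adj_dup_iff l hord).mp hdup⟩
  · rintro ⟨hord, hdup⟩
    exact ⟨(adj_dup_iff l hord).mpr hdup, hord⟩

-- ===== VERDICT (by name: the statement is the Claim_ definition above) =====
theorem valid_passwords_1_spec : Claim_equal_valid_passwords_1 := by
  intro passwords _
  unfold Spec_valid_passwords_1 valid_passwords_1 valid_passwords_1_alt
  simp only [PySem.List.foldl_if_true_eq, PySem.List.foldl_if_false_eq, Bool.false_or,
    Bool.true_and]
  rw [PySem.List.foldl_if_add_one]
  rw [zero_add]
  congr 1
  apply List.countP_congr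
  intro entry _
  exact entry_eq entry
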